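-- pv_equiv track=rewrite | github.com/Mateus-P-Oliveira/RedesAvancadasT1 | base.py | create_multicast_routes
-- ===== SOURCE A (Python) =====
-- from collections import defaultdict
--
-- def create_multicast_routes(subnets, routers, multicast_groups, unicast_routes):
--     multicast_routes = defaultdict(dict)
--
--     for mid, subnets_list in multicast_groups.items():
--         for subnet_id in subnets_list:
--             for rid, routes in unicast_routes.items():
--                 if subnet_id in routes:
--                     nexthop, ifnum = routes[subnet_id]
--                     if mid not in multicast_routes[rid]:
--                         multicast_routes[rid][mid] = []
--                     multicast_routes[rid][mid].append((nexthop, ifnum))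
--
--     return multicast_routes
-- ===== SOURCE B (Python) =====
-- def _group_first(pairs):
--     # generic first-occurrence group-by: key -> list of payloads, keys in first-seen order
--     d = {}
--     for k, v in pairs:
--         d.setdefault(k, []).append(v)
--     return d
--
-- def create_multicast_routes(subnets, routers, multicast_groups, unicast_routes):
--     # stage 1: invert unicast_routes into subnet -> [(router, (nexthop, ifnum))]
--     index = _group_first((s, (rid, val))
--                          for rid, routes in unicast_routes.items()
--                          for s, val in routes.items())
--     # stage 2: flat list of hits (router, (group, (nexthop, ifnum))) in A's emission order
--     hits = [(rid, (mid, val))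
--             for mid, subs in multicast_groups.items()
--             for s in subs
--             for rid, val in index.get(s, [])]
--     # stage 3: two-level group-by of the flat hits
--     return {r: _group_first(sub) for r, sub in _group_first(hits).items()}
-- ===== Notes on version B (the rewrite author's own statement) =====
-- stated objective: faster
-- what changed: B replaces A's scan of every router's route table for every (group, subnet) pair and its in-place nested-dict updates by three staged passes: invert unicast_routes into a subnet index, flatten to a list of (router, group, route) hits, then a generic two-level first-occurrence group-by over that flat list.
import Mathlib
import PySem

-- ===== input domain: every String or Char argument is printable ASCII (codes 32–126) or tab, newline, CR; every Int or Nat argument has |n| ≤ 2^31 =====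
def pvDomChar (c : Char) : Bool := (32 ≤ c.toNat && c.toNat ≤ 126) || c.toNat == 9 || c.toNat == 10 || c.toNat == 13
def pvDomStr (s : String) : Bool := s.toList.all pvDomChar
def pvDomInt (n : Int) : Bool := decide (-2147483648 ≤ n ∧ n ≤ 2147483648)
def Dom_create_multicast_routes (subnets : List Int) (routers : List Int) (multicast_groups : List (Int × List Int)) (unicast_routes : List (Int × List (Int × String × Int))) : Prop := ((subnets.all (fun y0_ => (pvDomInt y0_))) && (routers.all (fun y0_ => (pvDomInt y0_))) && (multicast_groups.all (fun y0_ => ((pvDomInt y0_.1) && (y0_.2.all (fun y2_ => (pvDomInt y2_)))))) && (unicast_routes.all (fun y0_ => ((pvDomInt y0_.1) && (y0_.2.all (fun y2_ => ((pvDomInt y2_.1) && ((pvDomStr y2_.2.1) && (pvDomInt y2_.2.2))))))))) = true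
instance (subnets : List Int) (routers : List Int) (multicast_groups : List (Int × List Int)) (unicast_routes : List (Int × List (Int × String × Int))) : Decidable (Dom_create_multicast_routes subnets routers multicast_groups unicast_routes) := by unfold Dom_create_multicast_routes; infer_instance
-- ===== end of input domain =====

-- B replaces A's per-(group,subnet) scan of every router's route table and its in-place nested-dict
-- updates by three staged passes: a subnet index, a flat hits list, and a generic two-level
-- first-occurrence group-by (objective: faster).

-- ===== PORT A =====
-- 'if mid not in multicast_routes[rid]: …[mid] = []' then '…[mid].append(...)'
-- (the defaultdict access inserts rid at the end on first touch; Dict.insert reproduces that)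
def pvUpdA (res : PySem.Dict Int (PySem.Dict Int (List (String × Int)))) (rid mid : Int)
    (val : String × Int) : PySem.Dict Int (PySem.Dict Int (List (String × Int))) :=
  let cur := res.getD rid PySem.Dict.empty
  let cur := if cur.contains mid then cur else cur.insert mid []
  let cur := cur.insert mid (cur.getD mid [] ++ [val])
  res.insert rid cur

def create_multicast_routes (subnets : List Int) (routers : List Int) (multicast_groups : List (Int × List Int)) (unicast_routes : List (Int × List (Int × String × Int))) : List (Int × List (Int × List (String × Int))) :=
  let res := multicast_groups.foldl (fun res p =>
    p.2.foldl (fun res s =>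
      unicast_routes.foldl (fun res q =>
        match (PySem.Dict.mk q.2).get? s with   -- 'if subnet_id in routes: … routes[subnet_id]'
        | some v => pvUpdA res q.1 p.1 v
        | none => res) res) res) PySem.Dict.empty
  res.items.map (fun p => (p.1, p.2.items))

-- ===== PORT B =====
-- '_group_first(pairs)': d.setdefault(k, []).append(v) over the pairs
def pvGroup {α : Type} (l : List (Int × α)) : PySem.Dict Int (List α) :=
  l.foldl (fun d p => d.modify p.1 [] (· ++ [p.2])) PySem.Dict.empty

def create_multicast_routes_alt (subnets : List Int) (routers : List Int) (multicast_groups : List (Int × List Int)) (unicast_routes : List (Int × List (Int × String × Int))) : List (Int × List (Int × List (String × Int))) :=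
  let index := pvGroup (unicast_routes.flatMap (fun q => q.2.map (fun e => (e.1, (q.1, e.2)))))
  let hits := multicast_groups.flatMap (fun p =>
    p.2.flatMap (fun s => (index.getD s []).map (fun t => (t.1, (p.1, t.2)))))
  (pvGroup hits).items.map (fun q => (q.1, (pvGroup q.2).items))

-- ===== PRECONDITION & SPEC =====
-- Pre_ only states the assoc-list representation invariant of the inner dicts: each router's route
-- table has distinct subnet keys; every input coming from a real Python dict satisfies it.
def Pre_create_multicast_routes (subnets : List Int) (routers : List Int) (multicast_groups : List (Int × List Int)) (unicast_routes : List (Int × List (Int × String × Int))) : Prop :=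
  ∀ q ∈ unicast_routes, (q.2.map Prod.fst).Nodup
instance (subnets : List Int) (routers : List Int) (multicast_groups : List (Int × List Int)) (unicast_routes : List (Int × List (Int × String × Int))) : Decidable (Pre_create_multicast_routes subnets routers multicast_groups unicast_routes) := by unfold Pre_create_multicast_routes; infer_instance

def pvWitness_create_multicast_routes : List Int × List Int × (List (Int × List Int)) × (List (Int × List (Int × String × Int))) :=
  ([1], [2], [(5, [7])], [(2, [(7, "a", 1)])])

def Spec_create_multicast_routes (subnets : List Int) (routers : List Int) (multicast_groups : List (Int × List Int)) (unicast_routes : List (Int × List (Int × String × Int))) (out : List (Int × List (Int × List (String × Int)))) : Prop := out = create_multicast_routes_alt subnets routers multicast_groups unicast_routes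
instance (subnets : List Int) (routers : List Int) (multicast_groups : List (Int × List Int)) (unicast_routes : List (Int × List (Int × String × Int))) (out : List (Int × List (Int × List (String × Int)))) : Decidable (Spec_create_multicast_routes subnets routers multicast_groups unicast_routes out) := by unfold Spec_create_multicast_routes; infer_instance

-- ===== CLAIM (what is proved, stated in full; the proofs are below) =====
def Claim_equal_create_multicast_routes : Prop := ∀ (subnets : List Int) (routers : List Int) (multicast_groups : List (Int × List Int)) (unicast_routes : List (Int × List (Int × String × Int))), Dom_create_multicast_routes subnets routers multicast_groups unicast_routes → Pre_create_multicast_routes subnets routers multicast_groups unicast_routes → Spec_create_multicast_routes subnets routers multicast_groups unicast_routes (create_multicast_routes subnets routers multicast_groups unicast_routes)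

-- ===== LEMMAS AND PROOFS =====

-- proof-only restatement of A's per-hit update in the modify form
def pvUpdB (res : PySem.Dict Int (PySem.Dict Int (List (String × Int)))) (rid mid : Int)
    (val : String × Int) : PySem.Dict Int (PySem.Dict Int (List (String × Int))) :=
  res.insert rid ((res.getD rid PySem.Dict.empty).modify mid [] (· ++ [val]))

lemma pv_updA_eq_updB (res : PySem.Dict Int (PySem.Dict Int (List (String × Int)))) (rid mid : Int)
    (val : String × Int) : pvUpdA res rid mid val = pvUpdB res rid mid val := by
  unfold pvUpdA pvUpdB
  have hmod : ∀ (d : PySem.Dict Int (List (String × Int))),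
      d.modify mid [] (· ++ [val]) = d.insert mid (d.getD mid [] ++ [val]) := fun _ => rfl
  set cur := res.getD rid PySem.Dict.empty with hc
  by_cases h : cur.contains mid = true
  · simp [h, hmod]
  · have h' : cur.contains mid = false := by simpa using h
    simp only [h', hmod, if_false, Bool.false_eq_true]
    rw [PySem.Dict.getD_insert_self, PySem.Dict.insert_insert_self,
       show cur.getD mid [] = [] from PySem.Dict.getD_of_not_contains _ _ h']

-- the routers whose unicast table covers subnet s, with their route, in router order
def pvMatches (unicast_routes : List (Int × List (Int × String × Int))) (s : Int) :
    List (Int × String × Int) :=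
  unicast_routes.flatMap (fun q => (q.2.filter (fun e => e.1 == s)).map (fun e => (q.1, e.2)))

-- B's subnet index, looked up at s, is exactly pvMatches
lemma pv_idx_getD (ur : List (Int × List (Int × String × Int))) (s : Int) :
    (pvGroup (ur.flatMap (fun q => q.2.map (fun e => (e.1, (q.1, e.2)))))).getD s []
      = pvMatches ur s := by
  unfold pvGroup pvMatches
  rw [PySem.Dict.getD_foldl_modify_append, PySem.Dict.getD_empty]
  simp [List.filter_flatMap, List.filter_map, List.map_flatMap, List.map_map, Function.comp_def]

-- with distinct keys, filtering an assoc list by key = the first-match dict lookup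
lemma pv_filter_nodup (routes : List (Int × String × Int)) (s : Int)
    (h : (routes.map Prod.fst).Nodup) :
    routes.filter (fun e => e.1 == s)
      = (match (PySem.Dict.mk routes).get? s with
         | none => [] | some v => [(s, v)]) := by
  induction routes with
  | nil => simp [PySem.Dict.get?]
  | cons e t ih =>
    simp only [List.map_cons, List.nodup_cons] at h
    rw [List.filter_cons, PySem.Dict.get?_mk_cons]
    by_cases he : e.1 = s
    · simp [← he]
      intro a a1 b hab hc
      exact h.1 (hc ▸ List.mem_map_of_mem hab)
    · have hb : (e.1 == s) = false := by simpa using he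
      simp only [hb]
      simpa using ih h.2

-- A's scan over all routers for one (mid, subnet) pair = a fold over the matching routers
lemma pv_innerA_eq (ur : List (Int × List (Int × String × Int))) (mid s : Int)
    (hp : ∀ q ∈ ur, (q.2.map Prod.fst).Nodup)
    (res : PySem.Dict Int (PySem.Dict Int (List (String × Int)))) :
    ur.foldl (fun res q =>
        match (PySem.Dict.mk q.2).get? s with
        | some v => pvUpdA res q.1 mid v
        | none => res) res
    = (pvMatches ur s).foldl (fun res t => pvUpdB res t.1 mid t.2) res := by
  induction ur generalizing res with
  | nil => simp [pvMatches]
  | cons q t ih =>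
    rw [List.foldl_cons, pvMatches, List.flatMap_cons, List.foldl_append,
        pv_filter_nodup q.2 s (hp q (List.mem_cons_self)),
        ih (fun q hq => hp q (List.mem_cons_of_mem _ hq))]
    cases hg : (PySem.Dict.mk q.2).get? s with
    | none => rfl
    | some v => simp [pv_updA_eq_updB, pvMatches]

-- the flat hits list, in A's emission order
def pvHits (multicast_groups : List (Int × List Int))
    (ur : List (Int × List (Int × String × Int))) : List (Int × Int × String × Int) :=
  multicast_groups.flatMap (fun p =>
    p.2.flatMap (fun s => (pvMatches ur s).map (fun t => (t.1, (p.1, t.2)))))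

-- one group's subnet loop, as a fold over that group's slice of the hits
lemma pv_A_group_fold (mid : Int) (subs : List Int) (ur : List (Int × List (Int × String × Int)))
    (hp : ∀ q ∈ ur, (q.2.map Prod.fst).Nodup)
    (res : PySem.Dict Int (PySem.Dict Int (List (String × Int)))) :
    subs.foldl (fun res s =>
        ur.foldl (fun res q =>
          match (PySem.Dict.mk q.2).get? s with
          | some v => pvUpdA res q.1 mid v
          | none => res) res) res
    = (subs.flatMap (fun s => (pvMatches ur s).map (fun t => (t.1, (mid, t.2))))).foldl
        (fun res h => pvUpdB res h.1 h.2.1 h.2.2) res := by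
  induction subs generalizing res with
  | nil => rfl
  | cons s t ih =>
    rw [List.foldl_cons, List.flatMap_cons, List.foldl_append, List.foldl_map,
        pv_innerA_eq ur mid s hp res, ih]

-- A's whole triple loop is the pvUpdB fold over the flat hits list
lemma pv_A_as_hits_fold (mg : List (Int × List Int)) (ur : List (Int × List (Int × String × Int)))
    (hp : ∀ q ∈ ur, (q.2.map Prod.fst).Nodup) :
    mg.foldl (fun res p =>
      p.2.foldl (fun res s =>
        ur.foldl (fun res q =>
          match (PySem.Dict.mk q.2).get? s with
          | some v => pvUpdA res q.1 p.1 v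
          | none => res) res) res) PySem.Dict.empty
    = (pvHits mg ur).foldl (fun res h => pvUpdB res h.1 h.2.1 h.2.2) PySem.Dict.empty := by
  unfold pvHits
  rw [List.foldl_flatMap]
  have hfg := funext fun res => funext fun p : Int × List Int =>
    pv_A_group_fold p.1 p.2 ur hp res
  rw [hfg]

-- lookup through items-wise value transformation
lemma pv_get?_map_items {ν ν' : Type} (d1 : PySem.Dict Int ν) (d2 : PySem.Dict Int ν')
    (f : ν' → ν) (h : d1.items = d2.items.map (fun q => (q.1, f q.2)))
    (hnd : d2.keys.Nodup) (k : Int) : d1.get? k = (d2.get? k).map f := by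
  have hk : d1.keys = d2.keys := by
    simp only [PySem.Dict.keys, h, List.map_map]; rfl
  have hnd1 : d1.keys.Nodup := hk ▸ hnd
  cases hg : d2.get? k with
  | none =>
    have hg' := (PySem.Dict.get?_eq_none_iff_not_mem_keys d2 k).mp hg
    have h1 : d1.get? k = none :=
      (PySem.Dict.get?_eq_none_iff_not_mem_keys d1 k).mpr (by rw [hk]; exact hg')
    simp [h1]
  | some v =>
    have hm : (k, v) ∈ d2.items := PySem.Dict.mem_items_of_get?_eq_some _ hg
    have hm1 : (k, f v) ∈ d1.items := by
      rw [h]; exact List.mem_map.mpr ⟨(k, v), hm, rfl⟩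
    simpa using PySem.Dict.get?_of_mem_items _ hm1 hnd1

lemma pv_group_keys_nodup {α : Type} (l : List (Int × α)) : (pvGroup l).keys.Nodup := by
  unfold pvGroup
  exact PySem.Dict.nodup_keys_foldl_modify_key l Prod.fst [] (fun d p => (· ++ [p.2]))
    PySem.Dict.empty PySem.Dict.nodup_keys_empty

lemma pv_group_snoc {α : Type} (l : List (Int × α)) (h : Int × α) :
    pvGroup (l ++ [h]) = (pvGroup l).modify h.1 [] (· ++ [h.2]) := by
  simp [pvGroup, List.foldl_append]

-- the central lemma: A's nested-dict fold over the hits = B's two-level group-by of the hits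
lemma pv_fold_group (hits : List (Int × Int × String × Int)) :
    ((hits.foldl (fun res h => pvUpdB res h.1 h.2.1 h.2.2) PySem.Dict.empty).items)
      = (pvGroup hits).items.map (fun q => (q.1, pvGroup q.2)) := by
  induction hits using List.reverseRecOn with
  | nil => simp [pvGroup]; rfl
  | append_singleton l h ih =>
    rw [List.foldl_append, List.foldl_cons, List.foldl_nil, pv_group_snoc]
    set F := l.foldl (fun res h => pvUpdB res h.1 h.2.1 h.2.2) PySem.Dict.empty with hF
    set G := pvGroup l with hG
    have hmod : (G.modify h.1 [] (· ++ [h.2])) = G.insert h.1 (G.getD h.1 [] ++ [h.2]) := rfl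
    have hkeys : F.keys = G.keys := by
      simp only [PySem.Dict.keys, ih, List.map_map]; rfl
    have hcont : F.contains h.1 = G.contains h.1 := by
      rw [PySem.Dict.contains_eq_decide_mem_keys, PySem.Dict.contains_eq_decide_mem_keys, hkeys]
    have hget : F.get? h.1 = (G.get? h.1).map pvGroup := pv_get?_map_items F G pvGroup ih (pv_group_keys_nodup l) h.1
    show (pvUpdB F h.1 h.2.1 h.2.2).items = _
    unfold pvUpdB
    rw [hmod]
    by_cases hc : G.contains h.1 = true
    · obtain ⟨v, hv⟩ : ∃ v, G.get? h.1 = some v := by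
        have := PySem.Dict.contains_eq_isSome_get? (d := G) (k := h.1)
        rw [hc] at this
        cases hgv : G.get? h.1 with
        | none => rw [hgv] at this; simp at this
        | some v => exact ⟨v, rfl⟩
      have hgd : G.getD h.1 [] = v := PySem.Dict.getD_of_get?_eq_some _ _ hv
      have hFgd : F.getD h.1 PySem.Dict.empty = pvGroup v := by
        rw [PySem.Dict.getD_eq_get?_getD, hget, hv]; rfl
      rw [PySem.Dict.items_insert_of_contains _ _ (hcont ▸ hc),
          PySem.Dict.items_insert_of_contains _ _ hc, ih, List.map_map, List.map_map]
      apply List.map_congr_left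
      intro q _
      by_cases hq : q.1 = h.1
      · simp only [Function.comp_def, hq, beq_self_eq_true, if_true, hgd]
        have : F.getD h.1 PySem.Dict.empty = pvGroup v := hFgd
        rw [this, ← pv_group_snoc v (h.2.1, h.2.2)]
      · simp [hq]
    · have hc' : G.contains h.1 = false := by simpa using hc
      have hcF : F.contains h.1 = false := by rw [hcont]; exact hc'
      have hFgd : F.getD h.1 PySem.Dict.empty = PySem.Dict.empty :=
        PySem.Dict.getD_of_not_contains _ _ hcF
      have hGgd : G.getD h.1 [] = [] := PySem.Dict.getD_of_not_contains _ _ hc'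
      rw [PySem.Dict.items_insert_of_not_contains _ _ hcF,
          PySem.Dict.items_insert_of_not_contains _ _ hc', ih, List.map_append, hFgd, hGgd]
      congr 1

-- ===== VERDICT (by name: the statement is the Claim_ definition above) =====
theorem create_multicast_routes_spec : Claim_equal_create_multicast_routes := by
  intro subnets routers mg ur _ hp
  unfold Spec_create_multicast_routes
  simp only [create_multicast_routes, create_multicast_routes_alt]
  have hhits : mg.flatMap (fun p =>
      p.2.flatMap (fun s =>
        (((pvGroup (ur.flatMap (fun q => q.2.map (fun e => (e.1, (q.1, e.2))))))).getD s []).map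
          (fun t => (t.1, (p.1, t.2)))))
      = pvHits mg ur := by
    unfold pvHits
    apply List.flatMap_congr
    intro p _
    apply List.flatMap_congr
    intro s _
    rw [pv_idx_getD]
  rw [hhits, pv_A_as_hits_fold mg ur hp, pv_fold_group, List.map_map]
  rfl
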